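-- pv_equiv track=rewrite | github.com/kylindreagan/Programming-Team | kattis/Unfinished/candy.py | min_swaps_to_front
-- ===== SOURCE A (Python) =====
-- import heapq
--
-- def min_swaps_to_front(boxes, F, T):
--     N = len(boxes)
--
--     indexed = [(boxes[i], i) for i in range(N)]
--
--     indexed.sort(reverse=True)
--
--     chosen = []
--     candy_sum = 0
--     index_sum = 0
--
--     best_cost = float('inf')
--
--     for candy, idx in indexed:
--         heapq.heappush(chosen, (-idx, candy))
--         candy_sum += candy
--         index_sum += idx
--
--         if len(chosen) > F:
--             neg_idx, removed_candy = heapq.heappop(chosen)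
--             index_sum -= -neg_idx
--             candy_sum -= removed_candy
--
--         if len(chosen) == F and candy_sum >= T:
--             cost = index_sum - F * (F - 1) // 2
--             best_cost = min(best_cost, cost)
--
--     return best_cost if best_cost != float('inf') else None
-- ===== SOURCE B (Python) =====
-- def min_swaps_to_front(boxes, F, T):
--     order = sorted(((c, i) for i, c in enumerate(boxes)), reverse=True)
--     window = []          # (idx, candy) pairs, kept sorted ascending by original index
--     candy_sum = 0
--     index_sum = 0
--     best = None
--     for candy, idx in order:
--         j = len(window)
--         while j > 0 and idx < window[j - 1][0]:
--             j -= 1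
--         window.insert(j, (idx, candy))
--         candy_sum += candy
--         index_sum += idx
--         if len(window) > F:
--             ridx, rcandy = window.pop()
--             candy_sum -= rcandy
--             index_sum -= ridx
--         if len(window) == F and candy_sum >= T:
--             cost = index_sum - F * (F - 1) // 2
--             if best is None or cost < best:
--                 best = cost
--     return best
-- ===== Notes on version B (the rewrite author's own statement) =====
-- stated objective: alternative
-- what changed: Replaces the heapq max-index heap by a window kept sorted ascending by original index: each box is inserted at its sorted position by a right-to-left scan and the overflow element is removed by popping the last (maximum-index) entry, with the running sums and minimum kept as before.
import Mathlib
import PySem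

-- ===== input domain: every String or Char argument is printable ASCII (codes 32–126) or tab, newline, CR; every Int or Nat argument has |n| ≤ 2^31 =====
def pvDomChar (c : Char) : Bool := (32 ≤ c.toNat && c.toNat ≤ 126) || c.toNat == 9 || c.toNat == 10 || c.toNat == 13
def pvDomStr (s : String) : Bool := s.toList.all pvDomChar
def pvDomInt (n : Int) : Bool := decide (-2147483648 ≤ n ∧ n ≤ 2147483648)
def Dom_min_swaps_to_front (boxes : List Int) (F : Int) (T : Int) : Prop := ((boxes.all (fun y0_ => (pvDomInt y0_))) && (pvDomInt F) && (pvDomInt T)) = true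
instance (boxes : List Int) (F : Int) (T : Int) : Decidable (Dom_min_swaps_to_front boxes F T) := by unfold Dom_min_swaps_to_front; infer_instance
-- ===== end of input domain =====

-- B replaces A's heapq max-index heap by a window kept sorted ascending by index (sorted insertion + pop-last); objective: alternative data structure, same return value proved.


-- ===== PORT A =====
-- The heap 'chosen' is represented by its multiset in insertion order; heappush appends,
-- heappop returns/removes the smallest (-idx, candy) pair (Python tuple order) — exact for
-- heapq's observable behaviour, which is determined by push/pop alone.
def pvStepA (F : Int) (T : Int) (st : List (Int × Int) × Int × Int × Option Int) (ci : Int × Int) :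
    List (Int × Int) × Int × Int × Option Int :=
  let chosen := st.1 ++ [(-ci.2, ci.1)]
  let candy_sum := st.2.1 + ci.1
  let index_sum := st.2.2.1 + ci.2
  let s3 : List (Int × Int) × Int × Int :=
    if F < (chosen.length : Int) then
      match PySem.List.min2? chosen (fun p => p.1) (fun p => p.2) with
      | some m =>
        match PySem.List.remove? chosen m with
        | some rest => (rest, candy_sum - m.2, index_sum - (-m.1))
        | none => (chosen, candy_sum, index_sum)
      | none => (chosen, candy_sum, index_sum)
    else (chosen, candy_sum, index_sum)
  let best :=
    if (s3.1.length : Int) = F ∧ T ≤ s3.2.1 then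
      let cost := s3.2.2 - PySem.Int.floordiv (F * (F - 1)) 2
      some (match st.2.2.2 with | none => cost | some b => min b cost)
    else st.2.2.2
  (s3.1, s3.2.1, s3.2.2, best)

def min_swaps_to_front (boxes : List Int) (F : Int) (T : Int) : Option Int :=
  let indexed := (PySem.List.enumerate boxes).map (fun p => (p.2, p.1))
  let srt := PySem.List.sorted2 indexed (fun x => x.1) (fun x => x.2) true
  (srt.foldl (pvStepA F T) ([], 0, 0, none)).2.2.2

-- ===== PORT B =====
-- Source B's right-to-left while-loop inserts (idx, candy) just before the first entry with a
-- larger index; pvInsort computes that same position (indices in the window are distinct,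
-- so the boundary is unique and the scan direction does not matter) — exact.
def pvInsort (x : Int × Int) : List (Int × Int) → List (Int × Int)
  | [] => [x]
  | y :: t => if x.1 < y.1 then x :: y :: t else y :: pvInsort x t

-- window.pop(): last element of the sorted window via getLast? / dropLast.
def pvGoB (F : Int) (T : Int) : List (Int × Int) → List (Int × Int) → Int → Int → Option Int → Option Int
  | [], _, _, _, best => best
  | ci :: rest, window, candy_sum, index_sum, best =>
    let w1 := pvInsort (ci.2, ci.1) window
    let cs1 := candy_sum + ci.1
    let is1 := index_sum + ci.2
    let s3 : List (Int × Int) × Int × Int :=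
      if F < (w1.length : Int) then
        match w1.getLast? with
        | some r => (w1.dropLast, cs1 - r.2, is1 - r.1)
        | none => (w1, cs1, is1)
      else (w1, cs1, is1)
    let best1 :=
      if (s3.1.length : Int) = F ∧ T ≤ s3.2.1 then
        let cost := s3.2.2 - PySem.Int.floordiv (F * (F - 1)) 2
        match best with
        | none => some cost
        | some b => if cost < b then some cost else some b
      else best
    pvGoB F T rest s3.1 s3.2.1 s3.2.2 best1

def min_swaps_to_front_alt (boxes : List Int) (F : Int) (T : Int) : Option Int :=
  let order := PySem.List.sorted2 ((PySem.List.enumerate boxes).map (fun p => (p.2, p.1)))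
      (fun x => x.1) (fun x => x.2) true
  pvGoB F T order [] 0 0 none

-- ===== PRECONDITION & SPEC =====
def Spec_min_swaps_to_front (boxes : List Int) (F : Int) (T : Int) (out : Option Int) : Prop := out = min_swaps_to_front_alt boxes F T
instance (boxes : List Int) (F : Int) (T : Int) (out : Option Int) : Decidable (Spec_min_swaps_to_front boxes F T out) := by unfold Spec_min_swaps_to_front; infer_instance

-- ===== CLAIM (what is proved, stated in full; the proofs are below) =====
def Claim_equal_min_swaps_to_front : Prop := ∀ (boxes : List Int) (F : Int) (T : Int), Dom_min_swaps_to_front boxes F T → Spec_min_swaps_to_front boxes F T (min_swaps_to_front boxes F T)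

-- ===== LEMMAS AND PROOFS =====

-- Proof-internal intermediate program M: A's heap held as an insertion-order list of
-- (idx, candy) pairs, removing the max-index element by scan.  Layer 1 proves A = M,
-- layer 2 proves M = B.
def pvStepM (F : Int) (T : Int) (st : List (Int × Int) × Int × Int × Option Int) (ci : Int × Int) :
    List (Int × Int) × Int × Int × Option Int :=
  let chosen := st.1 ++ [(ci.2, ci.1)]
  let candy_sum := st.2.1 + ci.1
  let index_sum := st.2.2.1 + ci.2
  let s3 : List (Int × Int) × Int × Int :=
    if F < (chosen.length : Int) then
      match PySem.List.max? chosen (fun p => p.1) with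
      | some w =>
        match PySem.List.remove? chosen w with
        | some rest => (rest, candy_sum - w.2, index_sum - w.1)
        | none => (chosen, candy_sum, index_sum)
      | none => (chosen, candy_sum, index_sum)
    else (chosen, candy_sum, index_sum)
  let best :=
    if (s3.1.length : Int) = F ∧ T ≤ s3.2.1 then
      let cost := s3.2.2 - PySem.Int.floordiv (F * (F - 1)) 2
      match st.2.2.2 with
      | none => some cost
      | some b => if cost < b then some cost else some b
    else st.2.2.2
  (s3.1, s3.2.1, s3.2.2, best)

def pvNeg (p : Int × Int) : Int × Int := (-p.1, p.2)

theorem pvNeg_inj : Function.Injective pvNeg := by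
  intro a b h
  simp [pvNeg, Prod.ext_iff] at h ⊢
  omega

theorem pvRemoveMap (ys : List (Int × Int)) (m : Int × Int) :
    PySem.List.remove? (ys.map pvNeg) (pvNeg m) = (PySem.List.remove? ys m).map (List.map pvNeg) := by
  induction ys with
  | nil => rfl
  | cons y t ih =>
    by_cases h : y = m
    · subst h; simp
    · have h2 : pvNeg y ≠ pvNeg m := fun hc => h (pvNeg_inj hc)
      rw [List.map_cons, PySem.List.remove?_cons_of_ne _ h2,
        PySem.List.remove?_cons_of_ne _ h, ih]
      cases PySem.List.remove? t m <;> rfl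

def pvMinStep (acc : Option (Int × Int)) (x : Int × Int) : Option (Int × Int) :=
  match acc with
  | none => some x
  | some w =>
    if (decide (x.1 < w.1) || !decide (w.1 < x.1) && decide (x.2 < w.2)) = true then some x else some w

def pvMaxStep (acc : Option (Int × Int)) (x : Int × Int) : Option (Int × Int) :=
  match acc with
  | none => some x
  | some w => if w.1 < x.1 then some x else some w

theorem pvMin2_eq_foldl (xs : List (Int × Int)) :
    PySem.List.min2? xs (fun p => p.1) (fun p => p.2) = xs.foldl pvMinStep none := by
  simp only [PySem.List.min2?]
  congr 1
  funext acc x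
  cases acc <;> rfl

theorem pvMax_eq_foldl (xs : List (Int × Int)) :
    PySem.List.max? xs (fun p => p.1) = xs.foldl pvMaxStep none := by
  simp only [PySem.List.max?]
  congr 1
  funext acc x
  cases acc <;> rfl

theorem pvMinMaxAux (ys : List (Int × Int)) (m : Int × Int)
    (h : ∀ y ∈ ys, y.1 ≠ m.1) (hnd : (ys.map (fun p => p.1)).Nodup) :
    List.foldl pvMinStep (some (pvNeg m)) (ys.map pvNeg) =
      Option.map pvNeg (List.foldl pvMaxStep (some m) ys) := by
  induction ys generalizing m with
  | nil => rfl
  | cons y t ih =>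
    simp only [List.map_cons, List.foldl_cons]
    have hy : y.1 ≠ m.1 := h y (List.mem_cons_self ..)
    simp only [List.map_cons, List.nodup_cons] at hnd
    rcases lt_or_gt_of_ne hy with hlt | hgt
    · have e1 : pvMinStep (some (pvNeg m)) (pvNeg y) = some (pvNeg m) := by
        simp [pvMinStep, pvNeg]; omega
      have e2 : pvMaxStep (some m) y = some m := by
        simp [pvMaxStep]; omega
      rw [e1, e2]
      exact ih m (fun z hz => h z (List.mem_cons_of_mem _ hz)) hnd.2
    · have e1 : pvMinStep (some (pvNeg m)) (pvNeg y) = some (pvNeg y) := by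
        simp [pvMinStep, pvNeg]; omega
      have e2 : pvMaxStep (some m) y = some y := by
        simp [pvMaxStep]; omega
      rw [e1, e2]
      refine ih y (fun z hz hez => ?_) hnd.2
      exact hnd.1 (hez ▸ List.mem_map_of_mem hz)

theorem pvMinMax (ys : List (Int × Int)) (hnd : (ys.map (fun p => p.1)).Nodup) :
    PySem.List.min2? (ys.map pvNeg) (fun p => p.1) (fun p => p.2) =
      Option.map pvNeg (PySem.List.max? ys (fun p => p.1)) := by
  cases ys with
  | nil => rfl
  | cons y t =>
    rw [pvMin2_eq_foldl, pvMax_eq_foldl]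
    simp only [List.map_cons, List.foldl_cons]
    have e1 : pvMinStep none (pvNeg y) = some (pvNeg y) := rfl
    have e2 : pvMaxStep none y = some y := rfl
    rw [e1, e2]
    simp only [List.map_cons, List.nodup_cons] at hnd
    exact pvMinMaxAux t y (fun z hz hez => hnd.1 (hez ▸ List.mem_map_of_mem hz)) hnd.2

def pvBestA (best : Option Int) (cost : Int) : Option Int :=
  some (match best with | none => cost | some b => min b cost)

def pvBestB (best : Option Int) (cost : Int) : Option Int :=
  match best with
  | none => some cost
  | some b => if cost < b then some cost else some b

theorem pvBest_eq (best : Option Int) (cost : Int) :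
    pvBestA best cost = pvBestB best cost := by
  unfold pvBestA pvBestB
  cases best with
  | none => rfl
  | some b =>
    simp only [min_def]
    split_ifs <;> first | rfl | (exfalso; omega)

theorem pvFold_eq (F T : Int) (l : List (Int × Int)) (chB : List (Int × Int)) (cs is_ : Int)
    (best : Option Int) (h : ((chB.map (fun p => p.1)) ++ (l.map (fun p => p.2))).Nodup) :
    l.foldl (pvStepA F T) (chB.map pvNeg, cs, is_, best) =
      (fun st => (st.1.map pvNeg, st.2)) (l.foldl (pvStepM F T) (chB, cs, is_, best)) := by
  induction l generalizing chB cs is_ best with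
  | nil => rfl
  | cons y t ih =>
    simp only [List.foldl_cons]
    have hmap : chB.map pvNeg ++ [(-y.2, y.1)] = (chB ++ [(y.2, y.1)]).map pvNeg := by
      simp [pvNeg]
    have hnd' : (((chB ++ [(y.2, y.1)]).map (fun p => p.1)) ++ (t.map (fun p => p.2))).Nodup := by
      have e : ((chB ++ [(y.2, y.1)]).map (fun p => p.1)) ++ (t.map (fun p => p.2))
          = (chB.map (fun p => p.1)) ++ ((y :: t).map (fun p => p.2)) := by
        simp
      rw [e]; exact h
    have hndf : ((chB ++ [(y.2, y.1)]).map (fun p => p.1)).Nodup :=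
      hnd'.sublist (List.sublist_append_left _ _)
    by_cases hF : F < (((chB ++ [(y.2, y.1)]).length : Int))
    · obtain ⟨w, hw⟩ : ∃ w, PySem.List.max? (chB ++ [(y.2, y.1)]) (fun p => p.1) = some w := by
        cases hmax : PySem.List.max? (chB ++ [(y.2, y.1)]) (fun p => p.1) with
        | none => exact absurd ((PySem.List.max?_eq_none_iff _ _).mp hmax) (by simp)
        | some w => exact ⟨w, rfl⟩
      have hwmem := PySem.List.max?_mem hw
      have hrem : PySem.List.remove? (chB ++ [(y.2, y.1)]) w
          = some ((chB ++ [(y.2, y.1)]).erase w) :=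
        PySem.List.remove?_eq_some_erase _ _ hwmem
      have hminA : PySem.List.min2? ((chB ++ [(y.2, y.1)]).map pvNeg) (fun p => p.1) (fun p => p.2)
          = some (pvNeg w) := by
        rw [pvMinMax _ hndf, hw]; rfl
      have hremA : PySem.List.remove? ((chB ++ [(y.2, y.1)]).map pvNeg) (pvNeg w)
          = some (((chB ++ [(y.2, y.1)]).erase w).map pvNeg) := by
        rw [pvRemoveMap, hrem]; rfl
      have hstepA : pvStepA F T (chB.map pvNeg, cs, is_, best) y
          = (((chB ++ [(y.2, y.1)]).erase w).map pvNeg, cs + y.1 - w.2, is_ + y.2 - w.1,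
             if ((((chB ++ [(y.2, y.1)]).erase w).length : Int) = F ∧ T ≤ cs + y.1 - w.2) then
               pvBestA best (is_ + y.2 - w.1 - PySem.Int.floordiv (F * (F - 1)) 2)
             else best) := by
        have hn1 : (pvNeg w).1 = -w.1 := rfl
        have hn2 : (pvNeg w).2 = w.2 := rfl
        simp only [pvStepA, pvBestA, hmap, List.length_map, hF, if_true, hminA, hremA, hn1, hn2, neg_neg]
      have hstepM : pvStepM F T (chB, cs, is_, best) y
          = ((chB ++ [(y.2, y.1)]).erase w, cs + y.1 - w.2, is_ + y.2 - w.1,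
             if ((((chB ++ [(y.2, y.1)]).erase w).length : Int) = F ∧ T ≤ cs + y.1 - w.2) then
               pvBestB best (is_ + y.2 - w.1 - PySem.Int.floordiv (F * (F - 1)) 2)
             else best) := by
        simp only [pvStepM, pvBestB, hF, if_true, hw, hrem]
      rw [hstepA, hstepM, pvBest_eq]
      refine ih _ _ _ _ ?_
      refine hnd'.sublist ?_
      exact List.Sublist.append_right ((List.erase_sublist ..).map _) _
    · have hstepA : pvStepA F T (chB.map pvNeg, cs, is_, best) y
          = ((chB ++ [(y.2, y.1)]).map pvNeg, cs + y.1, is_ + y.2,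
             if ((((chB ++ [(y.2, y.1)]).length : Int)) = F ∧ T ≤ cs + y.1) then
               pvBestA best (is_ + y.2 - PySem.Int.floordiv (F * (F - 1)) 2)
             else best) := by
        simp only [pvStepA, pvBestA, hmap, List.length_map, hF, if_false]
      have hstepM : pvStepM F T (chB, cs, is_, best) y
          = ((chB ++ [(y.2, y.1)]), cs + y.1, is_ + y.2,
             if ((((chB ++ [(y.2, y.1)]).length : Int)) = F ∧ T ≤ cs + y.1) then
               pvBestB best (is_ + y.2 - PySem.Int.floordiv (F * (F - 1)) 2)
             else best) := by
        simp only [pvStepM, pvBestB, hF, if_false]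
      rw [hstepA, hstepM, pvBest_eq]
      exact ih _ _ _ _ hnd'

theorem pv_nodup_snd (boxes : List Int) :
    (((PySem.List.sorted2 ((PySem.List.enumerate boxes).map (fun p => (p.2, p.1)))
       (fun x => x.1) (fun x => x.2) true).map (fun p => p.2))).Nodup := by
  have hperm : (PySem.List.sorted2 ((PySem.List.enumerate boxes).map (fun p => (p.2, p.1)))
      (fun x => x.1) (fun x => x.2) true).Perm ((PySem.List.enumerate boxes).map (fun p => (p.2, p.1))) :=
    PySem.List.sorted2_perm ..
  have hperm2 := hperm.map (fun p => p.2)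
  refine hperm2.nodup_iff.mpr ?_
  have : ((PySem.List.enumerate boxes).map (fun p => (p.2, p.1))).map (fun p : Int × Int => p.2)
      = (PySem.List.enumerate boxes).map (fun p => p.1) := by
    simp [Function.comp]
  rw [this]
  have hp := PySem.List.pairwise_lt_enumerate (xs := boxes) (s := 0)
  have h2 : ((PySem.List.enumerate boxes).map (fun p => p.1)).Pairwise (· < ·) :=
    List.pairwise_map.mpr hp
  exact h2.imp (fun {a b} hab => ne_of_lt hab)

-- ---- layer 2: M (insertion-order list + max scan) = B (sorted window + pop last) ----

theorem pvInsort_perm (x : Int × Int) (w : List (Int × Int)) :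
    (pvInsort x w).Perm (x :: w) := by
  induction w with
  | nil => simp [pvInsort]
  | cons y t ih =>
    simp only [pvInsort]
    split_ifs
    · exact List.Perm.refl _
    · exact (ih.cons y).trans (List.Perm.swap x y t)

theorem pvInsort_ne_nil (x : Int × Int) (w : List (Int × Int)) : pvInsort x w ≠ [] := by
  cases w with
  | nil => simp [pvInsort]
  | cons y t => simp only [pvInsort]; split_ifs <;> simp

theorem pvInsort_sorted (x : Int × Int) (w : List (Int × Int))
    (hne : ∀ z ∈ w, z.1 ≠ x.1) (hs : w.Pairwise (fun a b => a.1 < b.1)) :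
    (pvInsort x w).Pairwise (fun a b => a.1 < b.1) := by
  induction w with
  | nil => simp [pvInsort]
  | cons y t ih =>
    rw [List.pairwise_cons] at hs
    simp only [pvInsort]
    split_ifs with h
    · refine List.pairwise_cons.mpr ⟨?_, List.pairwise_cons.mpr hs⟩
      intro z hz
      rcases List.mem_cons.mp hz with rfl | hz
      · exact h
      · exact lt_trans h (hs.1 z hz)
    · have hyx : y.1 < x.1 := by
        have := hne y (List.mem_cons_self ..)
        omega
      refine List.pairwise_cons.mpr ⟨?_, ih (fun z hz => hne z (List.mem_cons_of_mem _ hz)) hs.2⟩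
      intro z hz
      have hz' : z ∈ x :: t := (pvInsort_perm x t).mem_iff.mp hz
      rcases List.mem_cons.mp hz' with rfl | hz'
      · exact hyx
      · exact hs.1 z hz'

theorem pvSorted_last_max (w : List (Int × Int)) (hne : w ≠ [])
    (hs : w.Pairwise (fun a b => a.1 < b.1)) :
    ∀ z ∈ w, z.1 ≤ (w.getLast hne).1 := by
  induction w with
  | nil => exact absurd rfl hne
  | cons y t ih =>
    rw [List.pairwise_cons] at hs
    intro z hz
    cases t with
    | nil =>
      rcases List.mem_cons.mp hz with rfl | hz
      · simp [List.getLast]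
      · simp at hz
    | cons b u =>
      have hlast : (y :: b :: u).getLast (by simp) = (b :: u).getLast (by simp) := by
        simp [List.getLast]
      rw [hlast]
      rcases List.mem_cons.mp hz with rfl | hz
      · have hmem : (b :: u).getLast (by simp) ∈ b :: u := List.getLast_mem _
        exact le_of_lt (hs.1 _ hmem)
      · exact ih (by simp) hs.2 z hz

theorem pvErase_last (w : List (Int × Int)) (hne : w ≠ []) (hnd : w.Nodup) :
    w.erase (w.getLast hne) = w.dropLast := by
  have heq : w.dropLast ++ [w.getLast hne] = w := List.dropLast_concat_getLast hne
  set m := w.getLast hne with hm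
  set dl := w.dropLast with hdl
  rw [← heq] at hnd ⊢
  have hnotin : m ∉ dl := by
    intro hmem
    exact (List.nodup_append.mp hnd).2.2 m hmem m (by simp) rfl
  rw [List.erase_append_right _ hnotin]
  simp

theorem pvGo_eq (F T : Int) (l : List (Int × Int)) (ch w : List (Int × Int)) (cs is_ : Int)
    (best : Option Int) (hperm : ch.Perm w) (hs : w.Pairwise (fun a b => a.1 < b.1))
    (hnd : ((ch.map (fun p => p.1)) ++ (l.map (fun p => p.2))).Nodup) :
    (l.foldl (pvStepM F T) (ch, cs, is_, best)).2.2.2 = pvGoB F T l w cs is_ best := by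
  induction l generalizing ch w cs is_ best with
  | nil => rfl
  | cons y t ih =>
    have hxny : ∀ z ∈ ch, z.1 ≠ y.2 := by
      intro z hz
      have h2 : y.2 ∈ List.map (fun p : Int × Int => p.2) (y :: t) := by simp
      exact (List.nodup_append.mp hnd).2.2 z.1 (List.mem_map_of_mem hz) y.2 h2
    have hperm1 : (ch ++ [(y.2, y.1)]).Perm (pvInsort (y.2, y.1) w) := by
      refine (List.perm_append_singleton (y.2, y.1) ch).trans ?_
      exact ((hperm.cons (y.2, y.1))).trans (pvInsort_perm (y.2, y.1) w).symm
    have hwne : ∀ z ∈ w, z.1 ≠ ((y.2, y.1) : Int × Int).1 := by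
      intro z hz
      exact hxny z (hperm.symm.mem_iff.mp hz)
    have hs1 : (pvInsort (y.2, y.1) w).Pairwise (fun a b => a.1 < b.1) :=
      pvInsort_sorted (y.2, y.1) w hwne hs
    have hnd' : (((ch ++ [(y.2, y.1)]).map (fun p => p.1)) ++ (t.map (fun p => p.2))).Nodup := by
      have e : ((ch ++ [(y.2, y.1)]).map (fun p : Int × Int => p.1)) ++ (t.map (fun p : Int × Int => p.2))
          = (ch.map (fun p : Int × Int => p.1)) ++ ((y :: t).map (fun p : Int × Int => p.2)) := by
        simp
      rw [e]; exact hnd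
    have hndf1 : ((ch ++ [(y.2, y.1)]).map (fun p => p.1)).Nodup :=
      hnd'.sublist (List.sublist_append_left _ _)
    have hndw1f : ((pvInsort (y.2, y.1) w).map (fun p => p.1)).Nodup :=
      ((hperm1.map (fun p => p.1)).nodup_iff).mp hndf1
    have hndw1 : (pvInsort (y.2, y.1) w).Nodup := hndw1f.of_map
    have hlen1 : (ch ++ [(y.2, y.1)]).length = (pvInsort (y.2, y.1) w).length := hperm1.length_eq
    simp only [List.foldl_cons]
    by_cases hF : F < (((ch ++ [(y.2, y.1)]).length : Int))
    · -- pop branch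
      have hFw : F < (((pvInsort (y.2, y.1) w).length : Int)) := by rw [← hlen1]; exact hF
      have hw1ne : pvInsort (y.2, y.1) w ≠ [] := pvInsort_ne_nil (y.2, y.1) w
      set r : Int × Int := (pvInsort (y.2, y.1) w).getLast hw1ne with hr
      have hglast : (pvInsort (y.2, y.1) w).getLast? = some r := by
        rw [hr]; exact List.getLast?_eq_some_getLast hw1ne
      have hrmemw : r ∈ pvInsort (y.2, y.1) w := hr ▸ List.getLast_mem hw1ne
      have hrmem : r ∈ ch ++ [(y.2, y.1)] := hperm1.mem_iff.mpr hrmemw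
      obtain ⟨m, hm⟩ : ∃ m, PySem.List.max? (ch ++ [(y.2, y.1)]) (fun p => p.1) = some m := by
        cases hmax : PySem.List.max? (ch ++ [(y.2, y.1)]) (fun p => p.1) with
        | none => exact absurd ((PySem.List.max?_eq_none_iff _ _).mp hmax) (by simp)
        | some m => exact ⟨m, rfl⟩
      have hmmem : m ∈ ch ++ [(y.2, y.1)] := PySem.List.max?_mem hm
      have hmmax : ∀ z ∈ ch ++ [(y.2, y.1)], z.1 ≤ m.1 := PySem.List.max?_isMax hm
      have hrmax : ∀ z ∈ pvInsort (y.2, y.1) w, z.1 ≤ r.1 := pvSorted_last_max _ hw1ne hs1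
      have hmr : m = r := by
        have h1 : m.1 ≤ r.1 := hrmax m (hperm1.mem_iff.mp hmmem)
        have h2 : r.1 ≤ m.1 := hmmax r hrmem
        exact List.inj_on_of_nodup_map hndf1 hmmem hrmem (le_antisymm h1 h2)
      have hrem : PySem.List.remove? (ch ++ [(y.2, y.1)]) m = some ((ch ++ [(y.2, y.1)]).erase m) :=
        PySem.List.remove?_eq_some_erase _ _ hmmem
      have hpermE : ((ch ++ [(y.2, y.1)]).erase r).Perm ((pvInsort (y.2, y.1) w).dropLast) := by
        rw [← pvErase_last (pvInsort (y.2, y.1) w) hw1ne hndw1]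
        exact hperm1.erase r
      have hlenE : ((((ch ++ [(y.2, y.1)]).erase r).length : Int))
          = ((((pvInsort (y.2, y.1) w).dropLast).length : Int)) := by
        rw [hpermE.length_eq]
      have hstepM : pvStepM F T (ch, cs, is_, best) y
          = ((ch ++ [(y.2, y.1)]).erase m, cs + y.1 - m.2, is_ + y.2 - m.1,
             if ((((ch ++ [(y.2, y.1)]).erase m).length : Int) = F ∧ T ≤ cs + y.1 - m.2) then
               pvBestB best (is_ + y.2 - m.1 - PySem.Int.floordiv (F * (F - 1)) 2)
             else best) := by
        simp only [pvStepM, pvBestB, hF, if_true, hm, hrem]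
      have hgoal : pvGoB F T (y :: t) w cs is_ best
          = pvGoB F T t ((pvInsort (y.2, y.1) w).dropLast) (cs + y.1 - r.2) (is_ + y.2 - r.1)
             (if (((((pvInsort (y.2, y.1) w).dropLast).length : Int)) = F ∧ T ≤ cs + y.1 - r.2) then
               pvBestB best (is_ + y.2 - r.1 - PySem.Int.floordiv (F * (F - 1)) 2)
             else best) := by
        simp only [pvGoB, pvBestB, hFw, if_true, hglast]
      rw [hstepM, hgoal, hmr, hlenE]
      refine ih _ _ _ _ _ hpermE (hs1.sublist (List.dropLast_sublist _)) ?_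
      refine hnd'.sublist ?_
      exact List.Sublist.append_right ((List.erase_sublist ..).map _) _
    · -- keep branch
      have hFw : ¬ F < (((pvInsort (y.2, y.1) w).length : Int)) := by rw [← hlen1]; exact hF
      have hlenc : (((ch ++ [(y.2, y.1)]).length : Int)) = (((pvInsort (y.2, y.1) w).length : Int)) := by
        rw [hlen1]
      have hstepM : pvStepM F T (ch, cs, is_, best) y
          = ((ch ++ [(y.2, y.1)]), cs + y.1, is_ + y.2,
             if ((((ch ++ [(y.2, y.1)]).length : Int)) = F ∧ T ≤ cs + y.1) then
               pvBestB best (is_ + y.2 - PySem.Int.floordiv (F * (F - 1)) 2)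
             else best) := by
        simp only [pvStepM, pvBestB]
        rw [if_neg hF]
      have hgoal : pvGoB F T (y :: t) w cs is_ best
          = pvGoB F T t (pvInsort (y.2, y.1) w) (cs + y.1) (is_ + y.2)
             (if ((((pvInsort (y.2, y.1) w).length : Int)) = F ∧ T ≤ cs + y.1) then
               pvBestB best (is_ + y.2 - PySem.Int.floordiv (F * (F - 1)) 2)
             else best) := by
        simp only [pvGoB, pvBestB]
        rw [if_neg hFw]
      rw [hstepM, hgoal, hlenc]
      exact ih _ _ _ _ _ hperm1 hs1 hnd'

-- ===== VERDICT (by name: the statement is the Claim_ definition above) =====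
theorem min_swaps_to_front_spec : Claim_equal_min_swaps_to_front := by
  intro boxes F T _
  unfold Spec_min_swaps_to_front min_swaps_to_front min_swaps_to_front_alt
  have hnd : (((([] : List (Int × Int)).map (fun p => p.1)) ++
      ((PySem.List.sorted2 ((PySem.List.enumerate boxes).map (fun p => (p.2, p.1)))
        (fun x => x.1) (fun x => x.2) true).map (fun p => p.2)))).Nodup := by
    simpa using pv_nodup_snd boxes
  have h1 := pvFold_eq F T
    (PySem.List.sorted2 ((PySem.List.enumerate boxes).map (fun p => (p.2, p.1)))
      (fun x => x.1) (fun x => x.2) true) [] 0 0 none hnd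
  simp only [List.map_nil] at h1
  have h2 := pvGo_eq F T
    (PySem.List.sorted2 ((PySem.List.enumerate boxes).map (fun p => (p.2, p.1)))
      (fun x => x.1) (fun x => x.2) true) [] [] 0 0 none (List.Perm.refl _) (by simp) hnd
  simp only [h1, h2]
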